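-- pv_equiv track=rewrite | github.com/biniyamtesfaye/A2SV | A2SV Remote Contest #7 17-Mar-2025/C - The Quantum Canyon Conundrum 309602.py | is_true_canyon
-- ===== SOURCE A (Python) =====
-- def is_true_canyon(n, a):
--     segments = []
--     i = 0
--     while i < n:
--         current = a[i]
--         l = i
--         while i < n and a[i] == current:
--             i += 1
--         r = i - 1
--         segments.append((l, r))
--
--     valid_segments = []
--     for l, r in segments:
--         left_cond = (l == 0) or (a[l-1] > a[l])
--         right_cond = (r == n-1) or (a[r] < a[r+1])
--         if left_cond and right_cond:
--             valid_segments.append((l, r))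
--
--     return len(valid_segments) == 1
-- ===== SOURCE B (Python) =====
-- def is_true_canyon(n, a):
--     # Compress the first n elements into their sequence of distinct run values,
--     # then count strict local minima of that sequence (boundaries count as higher
--     # neighbors); exactly one valley <=> True.
--     v = []
--     for i in range(n):
--         if not v or v[-1] != a[i]:
--             v.append(a[i])
--     count = 0
--     down = True  # is the left neighbor (or boundary) higher?
--     for x, y in zip(v, v[1:]):
--         if down and x < y:
--             count += 1
--         down = x > y
--     if v and down:
--         count += 1
--     return count == 1
-- ===== Notes on version B (the rewrite author's own statement) =====
-- stated objective: simpler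
-- what changed: Instead of building an explicit (l,r) segment list with a nested while loop and then re-checking neighbor indices in a second pass, B compresses the first n elements into their run values in one pass and counts strict local minima of that short sequence with a single carried 'down' flag (fewer passes over the full array and no tuple list).
import Mathlib
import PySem

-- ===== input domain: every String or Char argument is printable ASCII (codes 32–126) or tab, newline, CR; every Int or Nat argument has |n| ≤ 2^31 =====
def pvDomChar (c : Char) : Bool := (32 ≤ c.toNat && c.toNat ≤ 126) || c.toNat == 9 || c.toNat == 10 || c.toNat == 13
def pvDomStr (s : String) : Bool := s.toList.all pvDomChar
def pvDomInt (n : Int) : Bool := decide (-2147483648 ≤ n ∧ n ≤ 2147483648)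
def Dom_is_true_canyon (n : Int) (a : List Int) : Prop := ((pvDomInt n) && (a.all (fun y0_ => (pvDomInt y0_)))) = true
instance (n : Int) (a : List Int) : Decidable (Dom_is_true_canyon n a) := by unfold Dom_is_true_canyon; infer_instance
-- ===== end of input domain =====

-- B replaces A's explicit (l,r) segment list + neighbor re-checks by a single run-compression
-- pass followed by counting strict local minima of the compressed sequence (objective: simpler).

-- ===== PORT A =====
-- inner 'while i < n and a[i] == current: i += 1' (entered once unconditionally since a[i] == current at entry)
def skipRun (n : Int) (a : List Int) (c : Int) (i : Int) : Int :=
  if _h : i < n ∧ PySem.List.pyGetD a i 0 = c then skipRun n a c (i + 1) else i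
termination_by (n - i).toNat
decreasing_by omega

-- termination helper for the outer loop (cited in decreasing_by)
theorem skipRun_ge (n : Int) (a : List Int) (c : Int) : ∀ i, i ≤ skipRun n a c i := by
  intro i
  induction i using skipRun.induct n a c with
  | case1 i h ih => rw [skipRun, dif_pos h]; omega
  | case2 i h => rw [skipRun, dif_neg h]

-- outer 'while i < n: … segments.append((l, r))'
def segLoop (n : Int) (a : List Int) (i : Int) (acc : List (Int × Int)) : List (Int × Int) :=
  if _h : i < n then
    segLoop n a (skipRun n a (PySem.List.pyGetD a i 0) (i + 1))
      (acc ++ [(i, skipRun n a (PySem.List.pyGetD a i 0) (i + 1) - 1)])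
  else acc
termination_by (n - i).toNat
decreasing_by have := skipRun_ge n a (PySem.List.pyGetD a i 0) (i + 1); omega

-- 'left_cond and right_cond' for a segment (l, r)
def segCond (n : Int) (a : List Int) (lr : Int × Int) : Bool :=
  (decide (lr.1 = 0) || decide (PySem.List.pyGetD a (lr.1 - 1) 0 > PySem.List.pyGetD a lr.1 0)) &&
  (decide (lr.2 = n - 1) || decide (PySem.List.pyGetD a lr.2 0 < PySem.List.pyGetD a (lr.2 + 1) 0))

def is_true_canyon (n : Int) (a : List Int) : Bool :=
  let segments := segLoop n a 0 []
  let valid := segments.foldl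
    (fun vs lr => if segCond n a lr then vs ++ [lr] else vs) ([] : List (Int × Int))
  valid.length == 1

-- ===== PORT B =====
def is_true_canyon_alt (n : Int) (a : List Int) : Bool :=
  -- compress a[0:n] into its run values
  let v := (PySem.List.pyRange 0 n 1).foldl
    (fun v i => if v = [] ∨ v.getLast? ≠ some (PySem.List.pyGetD a i 0)
                then v ++ [PySem.List.pyGetD a i 0] else v) ([] : List Int)
  -- count strict local minima, scanning adjacent pairs with a carried 'down' flag
  let s := (v.zip v.tail).foldl
    (fun (s : Int × Bool) (p : Int × Int) =>
      (if s.2 ∧ p.1 < p.2 then s.1 + 1 else s.1, decide (p.1 > p.2))) ((0 : Int), true)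
  let count := if v ≠ [] ∧ s.2 then s.1 + 1 else s.1
  count == 1

-- ===== PRECONDITION & SPEC =====
-- Pre_ excludes only n > len(a): there A raises IndexError on a[i] (and B raises the same).
def Pre_is_true_canyon (n : Int) (a : List Int) : Prop := n ≤ (a.length : Int)
instance (n : Int) (a : List Int) : Decidable (Pre_is_true_canyon n a) := by
  unfold Pre_is_true_canyon; infer_instance

def pvWitness_is_true_canyon : Int × List Int := (3, [1, 2, 1])

def Spec_is_true_canyon (n : Int) (a : List Int) (out : Bool) : Prop := out = is_true_canyon_alt n a
instance (n : Int) (a : List Int) (out : Bool) : Decidable (Spec_is_true_canyon n a out) := by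
  unfold Spec_is_true_canyon; infer_instance

-- ===== CLAIM (what is proved, stated in full; the proofs are below) =====
def Claim_equal_is_true_canyon : Prop := ∀ (n : Int) (a : List Int), Dom_is_true_canyon n a → Pre_is_true_canyon n a → Spec_is_true_canyon n a (is_true_canyon n a)

-- ===== LEMMAS AND PROOFS =====

-- reference: consecutive-dedup (run values) of a list
def comp2 : Int → List Int → List Int
  | _, [] => []
  | y, x :: t => if x = y then comp2 y t else x :: comp2 x t

def comp : List Int → List Int
  | [] => []
  | x :: t => x :: comp2 x t

-- reference: number of strict local minima of a (dedupped) list, given whether the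
-- left neighbor (or boundary) is higher
def cnt : Bool → List Int → Int
  | _, [] => 0
  | d, [_] => if d then 1 else 0
  | d, x :: y :: t => (if d ∧ x < y then 1 else 0) + cnt (decide (x > y)) (y :: t)

-- ---- skipRun facts ----
theorem skipRun_le (n : Int) (a : List Int) (c : Int) :
    ∀ i, i ≤ n → skipRun n a c i ≤ n := by
  intro i
  induction i using skipRun.induct n a c with
  | case1 i h ih => intro _; rw [skipRun, dif_pos h]; exact ih (by omega)
  | case2 i h => intro hi; rw [skipRun, dif_neg h]; exact hi

theorem skipRun_run (n : Int) (a : List Int) (c : Int) :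
    ∀ i k, i ≤ k → k < skipRun n a c i → PySem.List.pyGetD a k 0 = c := by
  intro i
  induction i using skipRun.induct n a c with
  | case1 i h ih =>
    intro k hk1 hk2
    rw [skipRun, dif_pos h] at hk2
    by_cases hki : k = i
    · subst hki; exact h.2
    · exact ih k (by omega) hk2
  | case2 i h =>
    intro k hk1 hk2
    rw [skipRun, dif_neg h] at hk2
    exact absurd hk1 (by omega)

theorem skipRun_stop (n : Int) (a : List Int) (c : Int) :
    ∀ i, skipRun n a c i < n → PySem.List.pyGetD a (skipRun n a c i) 0 ≠ c := by
  intro i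
  induction i using skipRun.induct n a c with
  | case1 i h ih => rw [skipRun, dif_pos h]; exact ih
  | case2 i h =>
    rw [skipRun, dif_neg h]
    intro hlt hc
    exact h ⟨hlt, hc⟩

theorem segLoop_append (n : Int) (a : List Int) :
    ∀ m i acc, (n - i).toNat = m → segLoop n a i acc = acc ++ segLoop n a i [] := by
  intro m
  induction m using Nat.strong_induction_on with
  | _ m ih =>
    intro i acc hm
    by_cases h : i < n
    · have hge := skipRun_ge n a (PySem.List.pyGetD a i 0) (i + 1)
      conv_lhs => rw [segLoop]
      conv_rhs => rw [segLoop]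
      simp only [dif_pos h]
      rw [ih (n - skipRun n a (PySem.List.pyGetD a i 0) (i + 1)).toNat (by omega) _ _ rfl,
          ih (n - skipRun n a (PySem.List.pyGetD a i 0) (i + 1)).toNat (by omega) _
            ([] ++ [(i, skipRun n a (PySem.List.pyGetD a i 0) (i + 1) - 1)]) rfl]
      simp
    · conv_lhs => rw [segLoop]
      conv_rhs => rw [segLoop]
      simp only [dif_neg h]
      simp

-- ---- drop/comp bridge ----
theorem drop_cons_at (n : Int) (a : List Int) (hlen : n ≤ (a.length : Int)) :
    ∀ k : Int, 0 ≤ k → k < n →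
      (a.take n.toNat).drop k.toNat
        = PySem.List.pyGetD a k 0 :: (a.take n.toNat).drop (k + 1).toNat := by
  intro k hk0 hkn
  have hlt : k.toNat < (a.take n.toNat).length := by
    simp only [List.length_take]; omega
  have h1 : (k + 1).toNat = k.toNat + 1 := by omega
  rw [List.drop_eq_getElem_cons hlt, h1]
  congr 1
  rw [List.getElem_take]
  rw [PySem.List.pyGetD_eq_getElem a 0 hk0 (by omega)]

theorem comp2_skip (n : Int) (a : List Int) (hlen : n ≤ (a.length : Int)) (c : Int) :
    ∀ m j k, (j - k).toNat = m → 0 ≤ k → k ≤ j → j ≤ n →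
      (∀ x, k ≤ x → x < j → PySem.List.pyGetD a x 0 = c) →
      comp2 c ((a.take n.toNat).drop k.toNat) = comp2 c ((a.take n.toNat).drop j.toNat) := by
  intro m
  induction m using Nat.strong_induction_on with
  | _ m ih =>
    intro j k hm hk0 hkj hjn hrun
    by_cases hkj' : k < j
    · rw [drop_cons_at n a hlen k hk0 (by omega)]
      rw [show comp2 c (PySem.List.pyGetD a k 0 :: (a.take n.toNat).drop (k + 1).toNat)
            = comp2 c ((a.take n.toNat).drop (k + 1).toNat) by
        simp [comp2, hrun k (le_refl k) hkj']]
      exact ih (j - (k + 1)).toNat (by omega) j (k + 1) rfl (by omega) (by omega) hjn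
        (fun x hx1 hx2 => hrun x (by omega) hx2)
    · have : k = j := by omega
      subst this; rfl

-- ---- main A-side lemma ----
theorem segLoop_count (n : Int) (a : List Int) (hn : 0 ≤ n) (hlen : n ≤ (a.length : Int)) :
    ∀ m i, (n - i).toNat = m → 0 ≤ i → i ≤ n →
      (((segLoop n a i []).filter (segCond n a)).length : Int)
        = cnt (decide (i = 0) || decide (PySem.List.pyGetD a (i - 1) 0 > PySem.List.pyGetD a i 0))
              (comp ((a.take n.toNat).drop i.toNat)) := by
  intro m
  induction m using Nat.strong_induction_on with
  | _ m ih =>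
    intro i hm hi0 hin
    by_cases h : i < n
    · have hij : i + 1 ≤ skipRun n a (PySem.List.pyGetD a i 0) (i + 1) :=
        skipRun_ge n a (PySem.List.pyGetD a i 0) (i + 1)
      set c := PySem.List.pyGetD a i 0 with hc
      set j := skipRun n a c (i + 1) with hj
      have hjn : j ≤ n := skipRun_le n a c (i + 1) (by omega)
      have hrunAll : ∀ x, i ≤ x → x < j → PySem.List.pyGetD a x 0 = c := by
        intro x hx1 hx2
        by_cases hxi : x = i
        · rw [hxi]
        · exact skipRun_run n a c (i + 1) x (by omega) hx2
      have hseg : segLoop n a i [] = (i, j - 1) :: segLoop n a j [] := by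
        conv_lhs => rw [segLoop]
        rw [dif_pos h]
        rw [segLoop_append n a (n - j).toNat j _ rfl]
        simp
        rfl
      have hcomp : comp ((a.take n.toNat).drop i.toNat)
          = c :: comp2 c ((a.take n.toNat).drop j.toNat) := by
        rw [drop_cons_at n a hlen i hi0 h]
        rw [show comp (c :: (a.take n.toNat).drop (i + 1).toNat)
              = c :: comp2 c ((a.take n.toNat).drop (i + 1).toNat) from rfl]
        congr 1
        exact comp2_skip n a hlen c (j - (i + 1)).toNat j (i + 1) rfl (by omega) (by omega)
          hjn (fun x hx1 hx2 => hrunAll x (by omega) hx2)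
      rw [hseg, hcomp, List.filter_cons]
      by_cases hjlt : j < n
      · -- interior run: right condition is (a[r] < a[r+1])
        have hgj : PySem.List.pyGetD a (j - 1) 0 = c := hrunAll (j - 1) (by omega) (by omega)
        have hstop : PySem.List.pyGetD a j 0 ≠ c := skipRun_stop n a c (i + 1) hjlt
        have hdj := drop_cons_at n a hlen j (by omega) hjlt
        have hcomp2 : comp2 c ((a.take n.toNat).drop j.toNat)
            = PySem.List.pyGetD a j 0 :: comp2 (PySem.List.pyGetD a j 0)
                ((a.take n.toNat).drop (j + 1).toNat) := by
          rw [hdj]; simp [comp2, hstop]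
        have hcompj : comp ((a.take n.toNat).drop j.toNat)
            = PySem.List.pyGetD a j 0 :: comp2 (PySem.List.pyGetD a j 0)
                ((a.take n.toNat).drop (j + 1).toNat) := by
          rw [hdj]; rfl
        have hIH := ih (n - j).toNat (by omega) j rfl (by omega) hjn
        rw [hcompj] at hIH
        rw [show (decide (j = 0) || decide (PySem.List.pyGetD a (j - 1) 0 > PySem.List.pyGetD a j 0))
              = decide (c > PySem.List.pyGetD a j 0) by
          rw [hgj]; simp; omega] at hIH
        rw [hcomp2]
        rw [show cnt (decide (i = 0) || decide (PySem.List.pyGetD a (i - 1) 0 > c))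
              (c :: PySem.List.pyGetD a j 0 :: comp2 (PySem.List.pyGetD a j 0)
                ((a.take n.toNat).drop (j + 1).toNat))
            = (if ((decide (i = 0) || decide (PySem.List.pyGetD a (i - 1) 0 > c)) = true
                    ∧ c < PySem.List.pyGetD a j 0) then 1 else 0)
              + cnt (decide (c > PySem.List.pyGetD a j 0))
                  (PySem.List.pyGetD a j 0 :: comp2 (PySem.List.pyGetD a j 0)
                    ((a.take n.toNat).drop (j + 1).toNat)) from rfl]
        rw [← hIH]
        simp only [segCond, hgj, show (j : Int) - 1 + 1 = j by ring,
          show decide ((j : Int) - 1 = n - 1) = false by simp; omega]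
        cases hb : (decide (i = 0) || decide (PySem.List.pyGetD a (i - 1) 0 > c)) <;>
          by_cases hcv : c < PySem.List.pyGetD a j 0 <;>
            simp [hcv] <;> omega
      · -- last run: r = n - 1, right condition is True
        have hjeq : j = n := by omega
        have hdropn : (a.take n.toNat).drop j.toNat = [] := by
          apply List.drop_eq_nil_of_le
          simp only [List.length_take]
          omega
        have hsegn : segLoop n a j [] = [] := by
          rw [segLoop, dif_neg (by omega : ¬ j < n)]
        rw [hdropn, hsegn]
        simp only [segCond, show decide ((j : Int) - 1 = n - 1) = true by simp; omega]
        cases hb : (decide (i = 0) || decide (PySem.List.pyGetD a (i - 1) 0 > c)) <;>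
          simp [cnt, comp2]
    · rw [show segLoop n a i [] = [] by rw [segLoop, dif_neg h]]
      rw [show (a.take n.toNat).drop i.toNat = [] by
        apply List.drop_eq_nil_of_le; simp only [List.length_take]; omega]
      simp [comp, cnt]

-- ---- B-side lemmas ----
theorem compress_foldl :
    ∀ (t : List Int) (acc : List Int) (y : Int), acc.getLast? = some y →
      t.foldl (fun v x => if v = [] ∨ v.getLast? ≠ some x then v ++ [x] else v) acc
        = acc ++ comp2 y t := by
  intro t
  induction t with
  | nil => intro acc y hy; simp [comp2]
  | cons x t ihx =>
    intro acc y hy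
    have hne : acc ≠ [] := by intro hh; rw [hh] at hy; simp at hy
    by_cases hxy : x = y
    · subst hxy
      rw [List.foldl_cons]
      rw [show (if acc = [] ∨ acc.getLast? ≠ some x then acc ++ [x] else acc) = acc by
        simp [hne, hy]]
      rw [ihx acc x hy]
      simp [comp2]
    · rw [List.foldl_cons]
      rw [show (if acc = [] ∨ acc.getLast? ≠ some x then acc ++ [x] else acc) = acc ++ [x] by
        simp [hne, hy]; omega]
      rw [ihx (acc ++ [x]) x (by simp)]
      simp [comp2, hxy]

theorem cnt_foldl :
    ∀ (t : List Int) (x : Int) (c : Int) (d : Bool),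
      (fun s : Int × Bool => if s.2 then s.1 + 1 else s.1)
        (((x :: t).zip t).foldl
          (fun (s : Int × Bool) (p : Int × Int) =>
            (if s.2 ∧ p.1 < p.2 then s.1 + 1 else s.1, decide (p.1 > p.2))) (c, d))
        = c + cnt d (x :: t) := by
  intro t
  induction t with
  | nil => intro x c d; cases d <;> simp [cnt]
  | cons y t ihy =>
    intro x c d
    rw [show (x :: y :: t).zip (y :: t) = (x, y) :: ((y :: t).zip t) by simp]
    rw [List.foldl_cons]
    rw [ihy y (if d ∧ x < y then c + 1 else c) (decide (x > y))]
    rw [show cnt d (x :: y :: t)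
          = (if d ∧ x < y then 1 else 0) + cnt (decide (x > y)) (y :: t) from rfl]
    generalize cnt (decide (x > y)) (y :: t) = K
    split_ifs <;> omega

theorem beq_one_cast (L : Nat) : (L == 1) = decide ((L : Int) = 1) := by
  by_cases h : L = 1 <;> simp [h]

theorem canyonA_char (n : Int) (a : List Int) (hn : 0 ≤ n) (hlen : n ≤ (a.length : Int)) :
    is_true_canyon n a = decide (cnt true (comp (a.take n.toNat)) = 1) := by
  unfold is_true_canyon
  have h0 := segLoop_count n a hn hlen (n - 0).toNat 0 rfl le_rfl hn
  rw [show (decide ((0 : Int) = 0)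
        || decide (PySem.List.pyGetD a (0 - 1) 0 > PySem.List.pyGetD a 0 0)) = true by simp] at h0
  rw [show ((0 : Int)).toNat = 0 from rfl, List.drop_zero] at h0
  show ((List.foldl (fun vs lr => if segCond n a lr = true then vs ++ [lr] else vs) []
          (segLoop n a 0 [])).length == 1)
      = decide (cnt true (comp (a.take n.toNat)) = 1)
  rw [PySem.List.foldl_append_if_eq_filter (segCond n a) (segLoop n a 0 []) []]
  rw [List.nil_append]
  rw [beq_one_cast]
  rw [h0]

theorem compress_run (a : List Int) (n : Int) (hn : 0 ≤ n) (hlen : n ≤ (a.length : Int)) :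
    (PySem.List.pyRange 0 n 1).foldl
      (fun v i => if v = [] ∨ v.getLast? ≠ some (PySem.List.pyGetD a i 0)
                  then v ++ [PySem.List.pyGetD a i 0] else v) []
      = comp (a.take n.toNat) := by
  have hxslen : ((a.take n.toNat).length : Int) = n := by
    simp only [List.length_take]; omega
  have hga : ∀ i : Int, i ∈ PySem.List.pyRange 0 n 1 →
      PySem.List.pyGetD a i 0 = PySem.List.pyGetD (a.take n.toNat) i 0 := by
    intro i hi
    rw [PySem.List.mem_pyRange_one] at hi
    rw [PySem.List.pyGetD_eq_getElem a 0 hi.1 (by omega),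
        PySem.List.pyGetD_eq_getElem (a.take n.toNat) 0 hi.1 (by rw [hxslen]; exact hi.2)]
    rw [List.getElem_take]
  have hcongr := PySem.List.foldl_congr_mem (PySem.List.pyRange 0 n 1)
    (fun v i => if v = [] ∨ v.getLast? ≠ some (PySem.List.pyGetD a i 0)
                then v ++ [PySem.List.pyGetD a i 0] else v)
    (fun v i => if v = [] ∨ v.getLast? ≠ some (PySem.List.pyGetD (a.take n.toNat) i 0)
                then v ++ [PySem.List.pyGetD (a.take n.toNat) i 0] else v)
    [] (by intro acc x hx; simp only [hga x hx])
  rw [hcongr]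
  have hfold := PySem.List.foldl_pyRange_zero_pyGetD' (a.take n.toNat) 0
    (fun v x => if v = [] ∨ v.getLast? ≠ some x then v ++ [x] else v) []
  rw [hxslen] at hfold
  refine hfold.trans ?_
  cases hxs : a.take n.toNat with
  | nil => simp [comp]
  | cons x t =>
    rw [List.foldl_cons]
    rw [show (if ([] : List Int) = [] ∨ ([] : List Int).getLast? ≠ some x
          then ([] : List Int) ++ [x] else []) = [x] by simp]
    rw [compress_foldl t [x] x (by simp)]
    simp [comp]

theorem canyonB_char (n : Int) (a : List Int) (hn : 0 ≤ n) (hlen : n ≤ (a.length : Int)) :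
    is_true_canyon_alt n a = decide (cnt true (comp (a.take n.toNat)) = 1) := by
  unfold is_true_canyon_alt
  rw [compress_run a n hn hlen]
  cases hcs : comp (a.take n.toNat) with
  | nil => simp [cnt]
  | cons x t =>
    simp only [List.tail_cons, ne_eq, reduceCtorEq, not_false_eq_true, true_and]
    have hcf := cnt_foldl t x 0 true
    simp only [] at hcf
    rw [hcf]
    rw [Int.zero_add]
    by_cases h1 : cnt true (x :: t) = 1 <;> simp [h1]

-- ===== VERDICT (by name: the statement is the Claim_ definition above) =====
theorem is_true_canyon_spec : Claim_equal_is_true_canyon := by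
  intro n a _dom pre
  unfold Spec_is_true_canyon
  unfold Pre_is_true_canyon at pre
  by_cases hn : 0 ≤ n
  · rw [canyonA_char n a hn pre, canyonB_char n a hn pre]
  · have hA : is_true_canyon n a = false := by
      unfold is_true_canyon
      rw [show segLoop n a 0 [] = [] by rw [segLoop, dif_neg (by omega : ¬ (0 : Int) < n)]]
      simp
    have hB : is_true_canyon_alt n a = false := by
      unfold is_true_canyon_alt
      rw [PySem.List.pyRange_one_eq_nil (by omega)]
      simp
    rw [hA, hB]
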